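-- pv_equiv track=rewrite | github.com/tornike440/GOA-projects | lvl40/hw/8kyu/hw8.py | upperit
-- ===== SOURCE A (Python) =====
-- def upperit(a):
--     flag=1
--     answer=[]
--     for i in range (0,len(a)):
--         if flag == 1:
--             answer.append(a[i].upper())
--             flag=0
--         elif flag == 0:
--             answer.append(a[i].lower())
--             flag=1
--         #If the character is not an alphabet letter, leave it unchanged and reset the flag to 1.
--         if a[i].isalpha() == False:
--             flag=1
--
--     return "".join(answer)
-- ===== SOURCE B (Python) =====
-- def upperit(a):
--     # Split the string into maximal alphabetic runs; each run restarts the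
--     # alternation at upper-case, non-alphabetic characters pass through.
--     out = []
--     i = 0
--     n = len(a)
--     while i < n:
--         if a[i].isalpha():
--             j = i
--             while j < n and a[j].isalpha():
--                 j += 1
--             out.append(''.join(c.upper() if k % 2 == 0 else c.lower()
--                                for k, c in enumerate(a[i:j])))
--             i = j
--         else:
--             out.append(a[i])
--             i += 1
--     return ''.join(out)
-- ===== Notes on version B (the rewrite author's own statement) =====
-- stated objective: alternative
-- what changed: Replaces A's per-character flag automaton with a run-splitting scan: the string is cut into maximal alphabetic runs, each run is re-cased by position parity (even->upper, odd->lower), and non-alphabetic characters pass through unchanged.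
import Mathlib
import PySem

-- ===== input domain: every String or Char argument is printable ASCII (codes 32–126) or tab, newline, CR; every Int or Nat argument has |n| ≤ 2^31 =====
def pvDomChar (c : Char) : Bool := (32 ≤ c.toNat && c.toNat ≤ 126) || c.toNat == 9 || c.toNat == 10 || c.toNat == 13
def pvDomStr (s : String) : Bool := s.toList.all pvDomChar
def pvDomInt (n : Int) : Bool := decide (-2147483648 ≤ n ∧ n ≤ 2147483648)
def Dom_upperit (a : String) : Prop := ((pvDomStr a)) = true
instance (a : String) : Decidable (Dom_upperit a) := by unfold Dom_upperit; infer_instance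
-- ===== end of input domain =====

-- B replaces A's per-character flag automaton with a run-splitting scan (maximal
-- alphabetic runs re-cased by position parity, non-alphabetic characters passed
-- through); alternative decomposition, same O(n) cost.

-- ===== PORT A =====
-- one loop iteration of A: the flag/answer update for character c
def stepA (st : Int × List Char) (c : Char) : Int × List Char :=
  let st1 : Int × List Char :=
    if st.1 = 1 then (0, st.2 ++ [PySem.Chars.upperChar c])
    else if st.1 = 0 then (1, st.2 ++ [PySem.Chars.lowerChar c])
    else st
  if PySem.Chars.isalpha c = false then (1, st1.2) else st1

def upperit (a : String) : String :=
  let st := (PySem.List.pyRange 0 (PySem.Str.len a) 1).foldl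
    (fun st i => stepA st (PySem.List.pyGetD a.toList i ' ')) (1, [])
  String.ofList st.2

-- ===== PORT B =====
-- '…'.join(c.upper() if k % 2 == 0 else c.lower() for k, c in enumerate(run))
def altRun (run : List Char) : List Char :=
  (PySem.List.enumerate run 0).map
    (fun p => if PySem.Int.mod p.1 2 = 0 then PySem.Chars.upperChar p.2
              else PySem.Chars.lowerChar p.2)

-- the outer while-loop of B: take a maximal alphabetic run, or copy one char
def runsB : List Char → List Char
  | [] => []
  | c :: rest =>
    if PySem.Chars.isalpha c then
      altRun ((c :: rest).takeWhile PySem.Chars.isalpha)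
        ++ runsB ((c :: rest).dropWhile PySem.Chars.isalpha)
    else c :: runsB rest
termination_by cs => cs.length
decreasing_by
  · rename_i h
    rw [List.dropWhile_cons_of_pos h]
    have := List.length_dropWhile_le PySem.Chars.isalpha rest
    simp; omega
  · simp

def upperit_alt (a : String) : String := String.ofList (runsB a.toList)

-- ===== PRECONDITION & SPEC =====
def Spec_upperit (a : String) (out : String) : Prop := out = upperit_alt a
instance (a : String) (out : String) : Decidable (Spec_upperit a out) := by unfold Spec_upperit; infer_instance

-- ===== CLAIM (what is proved, stated in full; the proofs are below) =====
def Claim_equal_upperit : Prop := ∀ (a : String), Dom_upperit a → Spec_upperit a (upperit a)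

-- ===== LEMMAS AND PROOFS =====

-- A's loop rewritten structurally: output characters only (flag threaded)
def loopA (f : Int) : List Char → List Char
  | [] => []
  | c :: cs =>
    let o : List Char :=
      if f = 1 then [PySem.Chars.upperChar c]
      else if f = 0 then [PySem.Chars.lowerChar c] else []
    let f1 : Int := if f = 1 then 0 else if f = 0 then 1 else f
    let f2 : Int := if PySem.Chars.isalpha c = false then 1 else f1
    o ++ loopA f2 cs

-- B's per-run map rewritten with an explicit natural starting position
def altFrom (k : Nat) : List Char → List Char
  | [] => []
  | c :: cs =>
    (if k % 2 = 0 then PySem.Chars.upperChar c else PySem.Chars.lowerChar c)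
      :: altFrom (k + 1) cs

lemma upperChar_of_not_alpha {c : Char} (h : PySem.Chars.isalpha c = false) :
    PySem.Chars.upperChar c = c := by
  simp [PySem.Chars.isalpha] at h
  simp [PySem.Chars.upperChar, h.2]

lemma lowerChar_of_not_alpha {c : Char} (h : PySem.Chars.isalpha c = false) :
    PySem.Chars.lowerChar c = c := by
  simp [PySem.Chars.isalpha] at h
  simp [PySem.Chars.lowerChar, h.1]

lemma foldl_stepA_eq_loopA (cs : List Char) : ∀ (f : Int) (acc : List Char),
    (cs.foldl stepA (f, acc)).2 = acc ++ loopA f cs := by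
  induction cs with
  | nil => intro f acc; simp [loopA]
  | cons c cs ih =>
    intro f acc
    simp only [List.foldl_cons, loopA, stepA]
    split_ifs <;> simp [ih]

lemma altRun_eq_altFrom (run : List Char) : altRun run = altFrom 0 run := by
  suffices h : ∀ (s : Nat),
      (PySem.List.enumerate run (s : Int)).map
        (fun p => if PySem.Int.mod p.1 2 = 0 then PySem.Chars.upperChar p.2
                  else PySem.Chars.lowerChar p.2) = altFrom s run by
    simpa [altRun] using h 0
  induction run with
  | nil => intro s; simp [altFrom, PySem.List.enumerate_nil]
  | cons c cs ih =>
    intro s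
    rw [PySem.List.enumerate_cons]
    have hc : ((s : Int) + 1) = ((s + 1 : Nat) : Int) := by push_cast; ring
    have hm : PySem.Int.mod (s : Int) 2 = ((s % 2 : Nat) : Int) :=
      PySem.Int.mod_natCast s 2
    simp only [List.map_cons, hc, ih, altFrom, hm]
    by_cases h : s % 2 = 0
    · simp [h]
    · have h1 : s % 2 = 1 := by omega
      simp [h1]

def flagOf (k : Nat) : Int := if k % 2 = 0 then 1 else 0

lemma loopA_unf (f : Int) (x : Char) (xs : List Char) :
    loopA f (x :: xs) =
      (if f = 1 then [PySem.Chars.upperChar x]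
       else if f = 0 then [PySem.Chars.lowerChar x] else []) ++
      loopA (if PySem.Chars.isalpha x = false then 1
             else if f = 1 then 0 else if f = 0 then 1 else f) xs := rfl

lemma loopA_run (run : List Char) (hrun : ∀ c ∈ run, PySem.Chars.isalpha c = true) :
    ∀ (k : Nat) (rest : List Char),
    loopA (flagOf k) (run ++ rest) = altFrom k run ++ loopA (flagOf (k + run.length)) rest := by
  induction run with
  | nil => intro k rest; simp [altFrom]
  | cons c cs ih =>
    intro k rest
    have hc : PySem.Chars.isalpha c = true := hrun c (by simp)
    have hcs : ∀ x ∈ cs, PySem.Chars.isalpha x = true := fun x hx => hrun x (by simp [hx])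
    have e3 : (if PySem.Chars.isalpha c = false then (1 : Int)
               else if flagOf k = 1 then 0 else if flagOf k = 0 then 1 else flagOf k)
              = flagOf (k + 1) := by
      rw [hc]; unfold flagOf
      by_cases h : k % 2 = 0
      · have h1 : (k + 1) % 2 = 1 := by omega
        simp [h, h1]
      · have h1 : (k + 1) % 2 = 0 := by omega
        simp [h, h1]
    have e4 : (if flagOf k = 1 then [PySem.Chars.upperChar c]
               else if flagOf k = 0 then [PySem.Chars.lowerChar c] else [])
              = [if k % 2 = 0 then PySem.Chars.upperChar c else PySem.Chars.lowerChar c] := by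
      unfold flagOf; by_cases h : k % 2 = 0 <;> simp [h]
    have e5 : k + (c :: cs).length = (k + 1) + cs.length := by simp; omega
    rw [List.cons_append, loopA_unf, e3, e4, ih hcs (k + 1) rest, e5]
    simp [altFrom]

lemma flagOf_mem (k : Nat) : flagOf k = 0 ∨ flagOf k = 1 := by
  unfold flagOf; by_cases h : k % 2 = 0 <;> simp [h]

lemma loopA_nonalpha {f : Int} (hf : f = 0 ∨ f = 1) {d : Char}
    (hd : PySem.Chars.isalpha d = false) (rest : List Char) :
    loopA f (d :: rest) = d :: loopA 1 rest := by
  rcases hf with hf | hf <;>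
    simp [loopA, hf, hd, lowerChar_of_not_alpha hd, upperChar_of_not_alpha hd]

lemma loopA_eq_runsB : ∀ (n : Nat) (cs : List Char), cs.length ≤ n →
    loopA 1 cs = runsB cs := by
  intro n
  induction n with
  | zero => intro cs h; simp at h; simp [h, loopA, runsB]
  | succ n ih =>
    intro cs hlen
    match cs with
    | [] => simp [loopA, runsB]
    | c :: rest =>
      by_cases hc : PySem.Chars.isalpha c = true
      · rw [runsB]
        simp only [hc, if_true]
        have hall : ∀ x ∈ (c :: rest).takeWhile PySem.Chars.isalpha,
            PySem.Chars.isalpha x = true := fun x hx => List.mem_takeWhile_imp hx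
        have h0 := loopA_run _ hall 0 ((c :: rest).dropWhile PySem.Chars.isalpha)
        rw [List.takeWhile_append_dropWhile, show flagOf 0 = 1 from rfl] at h0
        rw [h0, altRun_eq_altFrom]
        congr 1
        have hlen' : ((c :: rest).dropWhile PySem.Chars.isalpha).length ≤ rest.length := by
          rw [List.dropWhile_cons_of_pos hc]
          exact List.length_dropWhile_le _ _
        cases hdw : (c :: rest).dropWhile PySem.Chars.isalpha with
        | nil => simp [loopA, runsB]
        | cons d rst' =>
          have hd : PySem.Chars.isalpha d = false := by
            have h2 := List.head?_dropWhile_not PySem.Chars.isalpha (c :: rest)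
            rw [hdw] at h2; simpa using h2
          rw [loopA_nonalpha (flagOf_mem _) hd, runsB]
          simp only [hd, Bool.false_eq_true, if_false]
          congr 1
          apply ih
          rw [hdw] at hlen'
          simp at hlen' hlen ⊢
          omega
      · have hc' : PySem.Chars.isalpha c = false := by simpa using hc
        rw [loopA_nonalpha (Or.inr rfl) hc', runsB]
        simp only [hc', Bool.false_eq_true, if_false]
        congr 1
        apply ih
        simp at hlen; omega

-- ===== VERDICT (by name: the statement is the Claim_ definition above) =====
theorem upperit_spec : Claim_equal_upperit := by
  intro a _
  unfold Spec_upperit upperit upperit_alt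
  simp only
  rw [show (PySem.Str.len a) = ((a.toList.length : Int)) from by simp [PySem.Str.len_eq]]
  rw [PySem.List.foldl_pyRange_zero_pyGetD' a.toList ' ' stepA (1, [])]
  rw [foldl_stepA_eq_loopA a.toList 1 []]
  rw [loopA_eq_runsB a.toList.length a.toList le_rfl]
  simp
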